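-- pv_equiv track=rewrite | github.com/Loc-1603/Travelling-Salesman-Problem-TSP- | ToiUuDuongDi/BCO.py | create_route_text
-- ===== SOURCE A (Python) =====
-- def create_route_text(route, names):
--     text_lines = []
--     rows = (len(route) + 1) // 2
--     for i in range(rows):
--         line = ""
--         for j in range(2):
--             idx = i + j * rows
--             if idx < len(route):
--                 marker = " (XP)" if idx == 0 else ""
--                 province_name = names[route[idx]]
--                 if len(province_name) > 10:
--                     province_name = province_name[:8] + ".."
--                 line += f"{idx+1:2d}. {province_name:10s}{marker}  "
--         text_lines.append(line)
--     text_lines.append(f"\n{len(route)+1:2d}. {names[route[0]]} (quay về)")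
--     return "\n".join(text_lines)
-- ===== SOURCE B (Python) =====
-- def create_route_text(route, names):
--     def cell(idx):
--         name = names[route[idx]]
--         if len(name) > 10:
--             name = name[:8] + ".."
--         marker = " (XP)" if idx == 0 else ""
--         return f"{idx+1:2d}. {name:10s}{marker}  "
--
--     cells = [cell(i) for i in range(len(route))]
--     rows = (len(route) + 1) // 2
--     left, right = cells[:rows], cells[rows:]
--     right += [""] * (len(left) - len(right))
--     lines = [l + r for l, r in zip(left, right)]
--     lines.append(f"\n{len(route)+1:2d}. {names[route[0]]} (quay về)")
--     return "\n".join(lines)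
-- ===== Notes on version B (the rewrite author's own statement) =====
-- stated objective: alternative
-- what changed: Replaces A's column-major nested loop with idx = i + j*rows index arithmetic by a precompute-then-slice-and-zip decomposition: format all cells in one left-to-right pass, split into left/right columns, pad the right column and zip the pairs into lines.
import Mathlib
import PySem

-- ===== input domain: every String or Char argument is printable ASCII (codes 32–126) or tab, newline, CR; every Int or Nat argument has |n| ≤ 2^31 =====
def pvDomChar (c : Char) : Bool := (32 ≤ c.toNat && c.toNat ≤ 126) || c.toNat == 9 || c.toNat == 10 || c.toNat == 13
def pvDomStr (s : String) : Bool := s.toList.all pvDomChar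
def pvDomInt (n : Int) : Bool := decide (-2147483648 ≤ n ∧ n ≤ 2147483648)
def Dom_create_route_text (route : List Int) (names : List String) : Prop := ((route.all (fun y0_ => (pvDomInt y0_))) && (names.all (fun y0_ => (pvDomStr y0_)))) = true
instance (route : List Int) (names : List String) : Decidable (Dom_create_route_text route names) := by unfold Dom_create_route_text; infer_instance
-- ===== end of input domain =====

-- B re-decomposes A's column-major nested index loop as: format all cells in one pass,
-- slice into left/right columns, pad and zip; same cost, different traversal (objective: alternative).

-- f"{m:2d}"  (right-align, width 2, space pad)
def pvFmt2 (m : Int) : List Char :=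
  let s := PySem.Int.toChars m
  if s.length < 2 then List.replicate (2 - s.length) ' ' ++ s else s

-- f"{s:10s}"  (left-align, width 10, space pad)
def pvPad10 (s : List Char) : List Char :=
  s ++ List.replicate (10 - s.length) ' '

-- ===== PORT A =====
def create_route_text (route : List Int) (names : List String) : String :=
  let n : Int := (route.length : Int)
  let rows : Int := PySem.Int.floordiv (n + 1) 2
  let text_lines : List (List Char) :=
    (PySem.List.pyRange 0 rows 1).foldl (fun tl i =>
      let line :=
        (PySem.List.pyRange 0 2 1).foldl (fun line j =>
          let idx := i + j * rows
          if idx < n then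
            let marker : List Char := if idx = 0 then " (XP)".toList else []
            let pname : List Char := (PySem.List.pyGetD names (PySem.List.pyGetD route idx 0) "").toList
            let pname : List Char :=
              if 10 < pname.length then PySem.List.slice pname none (some 8) ++ "..".toList else pname
            line ++ pvFmt2 (idx + 1) ++ ". ".toList ++ pvPad10 pname ++ marker ++ "  ".toList
          else line) []
      tl ++ [line]) []
  let text_lines := text_lines ++
    ["\n".toList ++ pvFmt2 (n + 1) ++ ". ".toList ++
      (PySem.List.pyGetD names (PySem.List.pyGetD route 0 0) "").toList ++ " (quay về)".toList]
  String.ofList (PySem.Chars.join "\n".toList text_lines)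

-- ===== PORT B =====
def create_route_text_alt (route : List Int) (names : List String) : String :=
  let cell : Int → List Char := fun idx =>
    let name : List Char := (PySem.List.pyGetD names (PySem.List.pyGetD route idx 0) "").toList
    let name : List Char :=
      if 10 < name.length then PySem.List.slice name none (some 8) ++ "..".toList else name
    let marker : List Char := if idx = 0 then " (XP)".toList else []
    pvFmt2 (idx + 1) ++ ". ".toList ++ pvPad10 name ++ marker ++ "  ".toList
  let cells : List (List Char) := (PySem.List.pyRange 0 (route.length : Int) 1).map cell
  let rows : Nat := (route.length + 1) / 2
  let left := cells.take rows
  let right := cells.drop rows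
  let right := right ++ List.replicate (left.length - right.length) []
  let lines := (left.zip right).map (fun p => p.1 ++ p.2)
  let lines := lines ++
    ["\n".toList ++ pvFmt2 ((route.length : Int) + 1) ++ ". ".toList ++
      (PySem.List.pyGetD names (PySem.List.pyGetD route 0 0) "").toList ++ " (quay về)".toList]
  String.ofList (PySem.Chars.join "\n".toList lines)

-- ===== PRECONDITION & SPEC =====
-- Pre_ excludes exactly the inputs where Python A raises IndexError: an empty route
-- (the final `route[0]`), or a route entry outside names' valid (negative-wrapping) index range.
def Pre_create_route_text (route : List Int) (names : List String) : Prop :=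
  route ≠ [] ∧ ∀ v ∈ route, -(names.length : Int) ≤ v ∧ v < (names.length : Int)
instance (route : List Int) (names : List String) : Decidable (Pre_create_route_text route names) := by
  unfold Pre_create_route_text; infer_instance

def pvWitness_create_route_text : List Int × List String := ([0, 1], ["Ha Noi", "Hai Phong"])

def Spec_create_route_text (route : List Int) (names : List String) (out : String) : Prop := out = create_route_text_alt route names
instance (route : List Int) (names : List String) (out : String) : Decidable (Spec_create_route_text route names out) := by unfold Spec_create_route_text; infer_instance

-- ===== CLAIM (what is proved, stated in full; the proofs are below) =====
def Claim_equal_create_route_text : Prop := ∀ (route : List Int) (names : List String), Dom_create_route_text route names → Pre_create_route_text route names → Spec_create_route_text route names (create_route_text route names)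

-- ===== LEMMAS AND PROOFS =====

-- A's column-major nested fold and B's cells/zip decomposition produce the same text.
theorem pv_ports_agree (route : List Int) (names : List String) :
    create_route_text route names = create_route_text_alt route names := by
  simp only [create_route_text, create_route_text_alt]
  rw [show PySem.Int.floordiv ((route.length:Int)+1) 2 = (((route.length+1)/2 : Nat):Int) from by
        simpa using PySem.Int.floordiv_natCast (route.length+1) 2]
  rw [PySem.List.pyRange_zero_natCast, PySem.List.pyRange_zero_natCast]
  rw [PySem.List.foldl_append_singleton_eq_map]
  refine congrArg String.ofList (congrArg _ ?_)
  simp only [List.nil_append]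
  congr 1
  apply List.ext_getElem
  · simp
    omega
  · intro i h1 h2
    have hi : i < (route.length + 1) / 2 := by
      simp only [List.length_map, List.length_range] at h1; exact h1
    have hRn : (route.length + 1) / 2 ≤ route.length := by omega
    simp only [List.getElem_map, List.getElem_range, List.getElem_zip, List.getElem_take,
               show PySem.List.pyRange 0 2 = [(0:Int),1] from by decide,
               List.foldl_cons, List.foldl_nil, zero_mul, add_zero, one_mul, List.nil_append,
               List.getElem_append, List.length_drop, List.length_map, List.length_range,
               List.getElem_drop, List.getElem_replicate]
    rw [if_pos (show (i:Int) < (route.length:Int) by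
          have := lt_of_lt_of_le hi hRn; exact_mod_cast this)]
    by_cases hc : (route.length + 1) / 2 + i < route.length
    · rw [if_pos (show (i:Int) + ((((route.length + 1) / 2 : Nat)) : Int) < (route.length:Int) by
            omega),
          dif_pos (show i < route.length - (route.length + 1) / 2 by omega)]
      have hx : ((((route.length + 1) / 2) + i : Nat) : Int) = (i:Int) + (((route.length + 1) / 2 : Nat) : Int) := by
        push_cast; ring
      rw [hx]
      simp [List.append_assoc]
    · rw [if_neg (show ¬ ((i:Int) + ((((route.length + 1) / 2 : Nat)) : Int) < (route.length:Int)) by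
            omega),
          dif_neg (show ¬ (i < route.length - (route.length + 1) / 2) by omega)]
      simp [List.append_assoc]

-- ===== VERDICT (by name: the statement is the Claim_ definition above) =====
theorem create_route_text_spec : Claim_equal_create_route_text := by
  intro route names _ _
  unfold Spec_create_route_text
  exact pv_ports_agree route names
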